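-- pv_equiv track=rewrite | github.com/DrGoo1/Music-Source-Separation-Training | Drummer_Style_App.py | get_drum_type
-- ===== SOURCE A (Python) =====
-- def get_drum_type(note_pitch):
--     drum_map = {
--         "kick": [35, 36],
--         "snare": [38, 40],
--         "hihat": [42, 44, 46],
--         "crash": [49, 57],
--         "ride": [51, 59]
--     }
--     for drum_type, pitches in drum_map.items():
--         if note_pitch in pitches:
--             return drum_type
--     return "other"
-- ===== SOURCE B (Python) =====
-- _PITCH_TO_DRUM = {
--     35: "kick", 36: "kick",
--     38: "snare", 40: "snare",
--     42: "hihat", 44: "hihat", 46: "hihat",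
--     49: "crash", 57: "crash",
--     51: "ride", 59: "ride",
-- }
--
-- def get_drum_type(note_pitch):
--     return _PITCH_TO_DRUM.get(note_pitch, "other")
-- ===== Notes on version B (the rewrite author's own statement) =====
-- stated objective: idiomatic
-- what changed: Replaces the loop over drum types with per-type membership scans by a single precomputed reverse dict mapping each pitch to its drum name, queried once with .get(note_pitch, 'other').
import Mathlib
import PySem

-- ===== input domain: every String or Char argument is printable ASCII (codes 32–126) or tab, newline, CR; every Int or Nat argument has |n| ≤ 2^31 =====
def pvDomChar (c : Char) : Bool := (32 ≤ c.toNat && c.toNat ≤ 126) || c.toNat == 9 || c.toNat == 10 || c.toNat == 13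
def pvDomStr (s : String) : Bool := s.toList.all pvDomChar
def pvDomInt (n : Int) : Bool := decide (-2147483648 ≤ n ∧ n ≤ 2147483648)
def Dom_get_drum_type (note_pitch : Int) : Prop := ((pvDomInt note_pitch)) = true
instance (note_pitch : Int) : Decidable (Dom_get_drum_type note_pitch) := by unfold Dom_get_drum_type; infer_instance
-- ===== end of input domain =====

-- B replaces A's loop of membership scans by one precomputed reverse pitch→name dict lookup (idiomatic).


-- ===== PORT A =====
-- the dict's items, in insertion order
def pvDrumMapA : List (String × List Int) :=
  [("kick", [35, 36]), ("snare", [38, 40]), ("hihat", [42, 44, 46]),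
   ("crash", [49, 57]), ("ride", [51, 59])]

-- the for-loop with early return: first pair whose pitch list contains note_pitch
def pvLoopA (note_pitch : Int) : List (String × List Int) → String
  | [] => "other"
  | (drum_type, pitches) :: rest =>
      if note_pitch ∈ pitches then drum_type else pvLoopA note_pitch rest

def get_drum_type (note_pitch : Int) : String := pvLoopA note_pitch pvDrumMapA

-- ===== PORT B =====
def pvPitchToDrum : PySem.Dict Int String :=
  PySem.Dict.mk [(35, "kick"), (36, "kick"), (38, "snare"), (40, "snare"),
   (42, "hihat"), (44, "hihat"), (46, "hihat"),
   (49, "crash"), (57, "crash"), (51, "ride"), (59, "ride")]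

def get_drum_type_alt (note_pitch : Int) : String :=
  PySem.Dict.getD pvPitchToDrum note_pitch "other"

-- ===== PRECONDITION & SPEC =====
def Spec_get_drum_type (note_pitch : Int) (out : String) : Prop := out = get_drum_type_alt note_pitch
instance (note_pitch : Int) (out : String) : Decidable (Spec_get_drum_type note_pitch out) := by unfold Spec_get_drum_type; infer_instance

-- ===== CLAIM (what is proved, stated in full; the proofs are below) =====
def Claim_equal_get_drum_type : Prop := ∀ (note_pitch : Int), Dom_get_drum_type note_pitch → Spec_get_drum_type note_pitch (get_drum_type note_pitch)

-- ===== LEMMAS AND PROOFS =====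

-- ===== VERDICT (by name: the statement is the Claim_ definition above) =====
theorem get_drum_type_spec : Claim_equal_get_drum_type := by
  intro n _
  unfold Spec_get_drum_type get_drum_type get_drum_type_alt pvDrumMapA pvPitchToDrum
  by_cases h1 : n = 35
  · subst h1; decide
  by_cases h2 : n = 36
  · subst h2; decide
  by_cases h3 : n = 38
  · subst h3; decide
  by_cases h4 : n = 40
  · subst h4; decide
  by_cases h5 : n = 42
  · subst h5; decide
  by_cases h6 : n = 44
  · subst h6; decide
  by_cases h7 : n = 46
  · subst h7; decide
  by_cases h8 : n = 49
  · subst h8; decide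
  by_cases h9 : n = 57
  · subst h9; decide
  by_cases h10 : n = 51
  · subst h10; decide
  by_cases h11 : n = 59
  · subst h11; decide
  simp [pvLoopA, PySem.Dict.getD, PySem.Dict.get?_mk_cons, PySem.Dict.get?, h1, h2, h3, h4, h5, h6, h7, h8, h9, h10, h11, (Ne.symm h1), (Ne.symm h2), (Ne.symm h3), (Ne.symm h4), (Ne.symm h5), (Ne.symm h6), (Ne.symm h7), (Ne.symm h8), (Ne.symm h9), (Ne.symm h10), (Ne.symm h11)]
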